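-- pv_equiv track=rewrite | github.com/Shree-git/AI-Konane-Game | konaneman.py | jumppath
-- ===== SOURCE A (Python) =====
-- def jumppath(from_row, from_col, to_row, to_col):
--     if from_row == to_row:
--         jump_over = [(to_row, j) for j \
--             in range(min(from_col, to_col)+1, max(from_col, to_col), 2)]
--         jump_land = [(to_row, j) for j \
--             in range(min(from_col, to_col)+2, max(from_col, to_col), 2)]
--         return (jump_over, jump_land)
--     elif from_col == to_col:
--         jump_over = [(i, to_col) for i \
--             in range(min(from_row, to_row)+1, max(from_row, to_row), 2)]
--         jump_land = [(i, to_col) for i \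
--             in range(min(from_row, to_row)+2, max(from_row, to_row), 2)]
--         return (jump_over, jump_land)
--
--     else:
--         return (None, None)
-- ===== SOURCE B (Python) =====
-- def jumppath(from_row, from_col, to_row, to_col):
--     if from_row == to_row:
--         lo, hi = min(from_col, to_col), max(from_col, to_col)
--         jump_over, jump_land = [], []
--         even = True
--         for j in range(lo + 1, hi):
--             if even:
--                 jump_over.append((to_row, j))
--             else:
--                 jump_land.append((to_row, j))
--             even = not even
--         return (jump_over, jump_land)
--     elif from_col == to_col:
--         lo, hi = min(from_row, to_row), max(from_row, to_row)
--         jump_over, jump_land = [], []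
--         even = True
--         for i in range(lo + 1, hi):
--             if even:
--                 jump_over.append((i, to_col))
--             else:
--                 jump_land.append((i, to_col))
--             even = not even
--         return (jump_over, jump_land)
--     else:
--         return (None, None)
-- ===== Notes on version B (the rewrite author's own statement) =====
-- stated objective: alternative
-- what changed: Replaces the two separate step-2 range comprehensions per branch with a single one-pass loop over the contiguous range that splits squares by parity (a toggled flag) into jump_over and jump_land.
import Mathlib
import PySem

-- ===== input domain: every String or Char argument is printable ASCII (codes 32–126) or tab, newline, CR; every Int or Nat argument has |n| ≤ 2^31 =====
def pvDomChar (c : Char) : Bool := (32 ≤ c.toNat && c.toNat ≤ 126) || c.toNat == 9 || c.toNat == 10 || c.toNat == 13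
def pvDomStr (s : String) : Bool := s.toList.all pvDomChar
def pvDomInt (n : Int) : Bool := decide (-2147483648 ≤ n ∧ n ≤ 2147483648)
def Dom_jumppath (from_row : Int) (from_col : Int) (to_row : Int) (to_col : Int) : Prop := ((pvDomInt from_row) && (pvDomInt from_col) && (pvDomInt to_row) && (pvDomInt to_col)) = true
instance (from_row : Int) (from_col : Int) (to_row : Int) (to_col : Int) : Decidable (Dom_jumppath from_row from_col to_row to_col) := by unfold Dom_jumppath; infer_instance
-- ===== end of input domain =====

-- B differs from A by decomposition only: one parity-split pass instead of two step-2 comprehensions; same values.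
-- ===== PORT A =====
def jumppath (from_row : Int) (from_col : Int) (to_row : Int) (to_col : Int) : (Option (List (Int × Int))) × (Option (List (Int × Int))) :=
  if from_row == to_row then
    let jump_over := (PySem.List.pyRange (min from_col to_col + 1) (max from_col to_col) 2).map (fun j => (to_row, j))
    let jump_land := (PySem.List.pyRange (min from_col to_col + 2) (max from_col to_col) 2).map (fun j => (to_row, j))
    (some jump_over, some jump_land)
  else if from_col == to_col then
    let jump_over := (PySem.List.pyRange (min from_row to_row + 1) (max from_row to_row) 2).map (fun i => (i, to_col))
    let jump_land := (PySem.List.pyRange (min from_row to_row + 2) (max from_row to_row) 2).map (fun i => (i, to_col))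
    (some jump_over, some jump_land)
  else
    (none, none)

-- ===== PORT B =====
-- one pass over range(lo+1, hi); the Bool is the 'even' toggle from Source B
def jumppathStep (f : Int → Int × Int) (st : List (Int × Int) × List (Int × Int) × Bool) (j : Int) :
    List (Int × Int) × List (Int × Int) × Bool :=
  if st.2.2 then (st.1 ++ [f j], st.2.1, false) else (st.1, st.2.1 ++ [f j], true)

def jumppath_alt (from_row : Int) (from_col : Int) (to_row : Int) (to_col : Int) : (Option (List (Int × Int))) × (Option (List (Int × Int))) :=
  if from_row == to_row then
    let lo := min from_col to_col
    let hi := max from_col to_col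
    let res := (PySem.List.pyRange (lo + 1) hi 1).foldl (jumppathStep (fun j => (to_row, j))) ([], [], true)
    (some res.1, some res.2.1)
  else if from_col == to_col then
    let lo := min from_row to_row
    let hi := max from_row to_row
    let res := (PySem.List.pyRange (lo + 1) hi 1).foldl (jumppathStep (fun i => (i, to_col))) ([], [], true)
    (some res.1, some res.2.1)
  else
    (none, none)

-- ===== PRECONDITION & SPEC =====
def Spec_jumppath (from_row : Int) (from_col : Int) (to_row : Int) (to_col : Int) (out : (Option (List (Int × Int))) × (Option (List (Int × Int)))) : Prop := out = jumppath_alt from_row from_col to_row to_col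
instance (from_row : Int) (from_col : Int) (to_row : Int) (to_col : Int) (out : (Option (List (Int × Int))) × (Option (List (Int × Int)))) : Decidable (Spec_jumppath from_row from_col to_row to_col out) := by unfold Spec_jumppath; infer_instance

-- ===== CLAIM (what is proved, stated in full; the proofs are below) =====
def Claim_equal_jumppath : Prop := ∀ (from_row : Int) (from_col : Int) (to_row : Int) (to_col : Int), Dom_jumppath from_row from_col to_row to_col → Spec_jumppath from_row from_col to_row to_col (jumppath from_row from_col to_row to_col)

-- ===== LEMMAS AND PROOFS =====
lemma pyRange_two_nil (a b : Int) (h : b ≤ a) : PySem.List.pyRange a b 2 = [] := by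
  rw [PySem.List.pyRange_of_pos a b (by norm_num)]
  simp [show ¬ a < b by omega]

lemma pyRange_two_cons (a b : Int) (h : a < b) : PySem.List.pyRange a b 2 = a :: PySem.List.pyRange (a + 2) b 2 := by
  rw [PySem.List.pyRange_of_pos a b (by norm_num), PySem.List.pyRange_of_pos (a + 2) b (by norm_num)]
  by_cases h2 : a + 2 < b
  · have hc : ((b - a + 2 - 1) / 2).toNat = ((b - (a + 2) + 2 - 1) / 2).toNat + 1 := by omega
    simp only [if_pos h, if_pos h2, hc, List.range_succ_eq_map, List.map_cons, List.map_map,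
      Nat.cast_zero, mul_zero, add_zero, List.cons.injEq, true_and]
    apply List.map_congr_left
    intro k _
    simp only [Function.comp_apply]
    push_cast
    ring
  · have hc : ((b - a + 2 - 1) / 2).toNat = 1 := by omega
    simp [if_pos h, if_neg h2, hc, List.range_succ]

lemma jumppath_loop (f : Int → Int × Int) : ∀ (n : Nat) (a b : Int), (b - a).toNat ≤ n → ∀ (ov ld : List (Int × Int)),
    ∃ fl, (PySem.List.pyRange a b 1).foldl (jumppathStep f) (ov, ld, true)
      = (ov ++ (PySem.List.pyRange a b 2).map f, ld ++ (PySem.List.pyRange (a + 1) b 2).map f, fl) := by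
  intro n
  induction n with
  | zero =>
    intro a b hn ov ld
    have hb : b ≤ a := by omega
    rw [PySem.List.pyRange_one_eq_nil hb, pyRange_two_nil a b hb, pyRange_two_nil (a + 1) b (by omega)]
    exact ⟨true, by simp⟩
  | succ n ih =>
    intro a b hn ov ld
    by_cases h1 : a < b
    · by_cases h2 : a + 1 < b
      · rw [PySem.List.pyRange_one_cons h1, PySem.List.pyRange_one_cons h2,
          show a + 1 + 1 = a + 2 by ring]
        obtain ⟨fl, hfl⟩ := ih (a + 2) b (by omega) (ov ++ [f a]) (ld ++ [f (a + 1)])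
        refine ⟨fl, ?_⟩
        simp only [List.foldl_cons, jumppathStep]
        norm_num
        rw [hfl, pyRange_two_cons a b h1, pyRange_two_cons (a + 1) b h2,
          show a + 1 + 2 = a + 2 + 1 by ring]
        simp
      · have hb : b = a + 1 := by omega
        subst hb
        rw [PySem.List.pyRange_one_cons h1, PySem.List.pyRange_one_eq_nil (by omega)]
        refine ⟨false, ?_⟩
        rw [pyRange_two_cons a (a + 1) h1, pyRange_two_nil (a + 2) (a + 1) (by omega),
          pyRange_two_nil (a + 1) (a + 1) (by omega)]
        simp [jumppathStep]
    · have hb : b ≤ a := by omega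
      rw [PySem.List.pyRange_one_eq_nil hb, pyRange_two_nil a b hb, pyRange_two_nil (a + 1) b (by omega)]
      exact ⟨true, by simp⟩

lemma jumppath_branch (lo hi : Int) (f : Int → Int × Int) :
    ((PySem.List.pyRange (lo + 1) hi 1).foldl (jumppathStep f) ([], [], true)).1
        = (PySem.List.pyRange (lo + 1) hi 2).map f ∧
    ((PySem.List.pyRange (lo + 1) hi 1).foldl (jumppathStep f) ([], [], true)).2.1
        = (PySem.List.pyRange (lo + 2) hi 2).map f := by
  obtain ⟨fl, hfl⟩ := jumppath_loop f (hi - (lo + 1)).toNat (lo + 1) hi (le_refl _) [] []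
  rw [hfl]
  simp [show lo + 1 + 1 = lo + 2 by ring]

-- ===== VERDICT (by name: the statement is the Claim_ definition above) =====
theorem jumppath_spec : Claim_equal_jumppath := by
  intro fr fc tr tc _
  unfold Spec_jumppath jumppath jumppath_alt
  by_cases h1 : fr == tr
  · simp only [if_pos h1]
    obtain ⟨h, h'⟩ := jumppath_branch (min fc tc) (max fc tc) (fun j => (tr, j))
    rw [h, h']
  · by_cases h2 : fc == tc
    · simp only [if_neg h1, if_pos h2]
      obtain ⟨h, h'⟩ := jumppath_branch (min fr tr) (max fr tr) (fun i => (i, tc))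
      rw [h, h']
    · have h1' : ¬ fr = tr := by simpa using h1
      have h2' : ¬ fc = tc := by simpa using h2
      simp [h1', h2']
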